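-- pv_equiv track=rewrite | github.com/hafskjfha/cp_ps | BOJ/3xxxx/34079/answer1.py | bfs
-- ===== SOURCE A (Python) =====
-- def bfs(gr,n):
--     from collections import deque,defaultdict
--     v=[-1]*(n+1)
--     q=deque([(1,0)])
--     parent=defaultdict(list)
--     parent[1]=None
--     v[1]=0
--     while q:
--         cur,d=q.popleft()
--         for nxt in gr[cur]:
--             if v[nxt]==-1:
--                 v[nxt]=d+1
--                 parent[nxt].append(cur)
--                 q.append((nxt,d+1))
--             elif v[nxt]==d+1:
--                 parent[nxt].append(cur)
--     return v,parent
-- ===== SOURCE B (Python) =====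
-- def bfs(gr, n):
--     from collections import deque, defaultdict
--     # Phase 1: plain BFS that only fills distances and records dequeue order.
--     v = [-1] * (n + 1)
--     v[1] = 0
--     order = []
--     q = deque([1])
--     while q:
--         cur = q.popleft()
--         order.append(cur)
--         for nxt in gr[cur]:
--             if v[nxt] == -1:
--                 v[nxt] = v[cur] + 1
--                 q.append(nxt)
--     # Phase 2: derive the DAG parent lists from the finished distance table,
--     # replaying the nodes in BFS dequeue order.
--     parent = defaultdict(list)
--     parent[1] = None
--     for cur in order:
--         dc = v[cur]
--         for nxt in gr[cur]:
--             if v[nxt] == dc + 1: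
--                 parent[nxt].append(cur)
--     return v, parent
-- ===== Notes on version B (the rewrite author's own statement) =====
-- stated objective: alternative
-- what changed: A builds distances and parent lists in one fused BFS loop; B first runs a plain BFS that only fills the distance table and records the dequeue order, then derives the parent lists in a separate second pass that replays that order against the finished distances (parent[nxt] gets cur iff v[nxt]==v[cur]+1). Pre_ excludes the inputs where A raises IndexError (reachable out-of-range labels) via a reachable-label closure; …
import Mathlib
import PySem

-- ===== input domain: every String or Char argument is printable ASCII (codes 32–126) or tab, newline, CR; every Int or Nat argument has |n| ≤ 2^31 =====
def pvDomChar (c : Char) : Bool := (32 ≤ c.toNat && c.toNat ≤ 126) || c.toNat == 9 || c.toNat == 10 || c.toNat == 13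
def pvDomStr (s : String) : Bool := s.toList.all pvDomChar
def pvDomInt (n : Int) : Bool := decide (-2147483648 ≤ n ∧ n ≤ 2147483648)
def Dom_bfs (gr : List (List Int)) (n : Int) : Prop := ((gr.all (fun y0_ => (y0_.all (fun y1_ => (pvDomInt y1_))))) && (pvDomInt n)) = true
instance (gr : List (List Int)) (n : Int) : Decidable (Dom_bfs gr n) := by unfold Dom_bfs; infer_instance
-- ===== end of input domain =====

-- B rebuilds the parent lists in a second pass over the recorded BFS dequeue order from the
-- finished distance table, instead of A's single fused BFS pass (objective: alternative decomposition).

-- ===== PORT A =====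
-- parent[nxt].append(cur) on the defaultdict(list) whose value at key 1 is None
-- (the 'some none' case is Python's AttributeError, unreachable on Pre_ inputs).
def padd (p : PySem.Dict Int (Option (List Int))) (k c : Int) : PySem.Dict Int (Option (List Int)) :=
  match p.get? k with
  | some (some l) => p.insert k (some (l ++ [c]))
  | some none => p
  | none => p.insert k (some [c])

-- body of 'for nxt in gr[cur]' in A: state (v, q, parent)
def stepA (cur d : Int) (st : List Int × List (Int × Int) × PySem.Dict Int (Option (List Int)))
    (nxt : Int) : List Int × List (Int × Int) × PySem.Dict Int (Option (List Int)) :=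
  if PySem.List.pyGet? st.1 nxt = some (-1) then
    (PySem.List.pySetD st.1 nxt (d + 1), st.2.1 ++ [(nxt, d + 1)], padd st.2.2 nxt cur)
  else if PySem.List.pyGet? st.1 nxt = some (d + 1) then
    (st.1, st.2.1, padd st.2.2 nxt cur)
  else st

-- 'while q:' of A, fuel-bounded (fuel n+2 suffices on Pre_: each dequeue follows a unique enqueue)
def bfsLoopA (gr : List (List Int)) :
    Nat → List Int → List (Int × Int) → PySem.Dict Int (Option (List Int)) →
    List Int × PySem.Dict Int (Option (List Int))
  | 0, v, _, p => (v, p)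
  | _ + 1, v, [], p => (v, p)
  | fuel + 1, v, (cur, d) :: qt, p =>
    let st := ((PySem.List.pyGet? gr cur).getD []).foldl (stepA cur d) (v, qt, p)
    bfsLoopA gr fuel st.1 st.2.1 st.2.2

def bfs (gr : List (List Int)) (n : Int) : List Int × (List (Int × Option (List Int))) :=
  let v0 := List.replicate (n + 1).toNat (-1 : Int)
  let v1 := PySem.List.pySetD v0 1 0
  let r := bfsLoopA gr (n + 2).toNat v1 [(1, 0)] (PySem.Dict.empty.insert 1 none)
  (r.1, r.2.items)

-- ===== PORT B =====
-- body of 'for nxt in gr[cur]' in B's BFS phase: state (v, q)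
def stepB (_cur dc : Int) (st : List Int × List Int) (nxt : Int) : List Int × List Int :=
  if PySem.List.pyGet? st.1 nxt = some (-1) then
    (PySem.List.pySetD st.1 nxt (dc + 1), st.2 ++ [nxt])
  else st

-- B phase 1: BFS filling only v, returning (v, dequeue order)
def bfsLoopB (gr : List (List Int)) : Nat → List Int → List Int → List Int × List Int
  | 0, v, _ => (v, [])
  | _ + 1, v, [] => (v, [])
  | fuel + 1, v, cur :: qt =>
    let dc := PySem.List.pyGetD v cur 0
    let st := ((PySem.List.pyGet? gr cur).getD []).foldl (stepB cur dc) (v, qt)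
    let r := bfsLoopB gr fuel st.1 st.2
    (r.1, cur :: r.2)

-- B phase 2: one replayed node of the dequeue order, against the finished distance table v'
def replayRow (gr : List (List Int)) (v' : List Int)
    (p : PySem.Dict Int (Option (List Int))) (cur : Int) : PySem.Dict Int (Option (List Int)) :=
  let dc := PySem.List.pyGetD v' cur 0
  ((PySem.List.pyGet? gr cur).getD []).foldl
    (fun p nxt => if PySem.List.pyGet? v' nxt = some (dc + 1) then padd p nxt cur else p) p

def bfs_alt (gr : List (List Int)) (n : Int) : List Int × (List (Int × Option (List Int))) :=
  let v0 := List.replicate (n + 1).toNat (-1 : Int)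
  let v1 := PySem.List.pySetD v0 1 0
  let r := bfsLoopB gr (n + 2).toNat v1 [1]
  (r.1, (r.2.foldl (replayRow gr r.1) (PySem.Dict.empty.insert 1 none)).items)

-- ===== PRECONDITION & SPEC =====
-- Pre_: A's domain is reachability-dependent (it raises IndexError only when BFS reaches an
-- out-of-range label), so Pre_ asks that n ≥ 1 (node 1 has a v slot), gr[1] exists, and every
-- label in the closure of labels reachable from node 1 is a valid gr index whose row holds only
-- valid v indices (Python's negative indices included).  This slightly over-approximates the
-- reached set when two distinct labels denote the same v slot, so a few inputs on which A
-- returns (bad labels hidden behind such an alias) are also excluded.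
def vOK (n x : Int) : Bool := decide (-(n + 1) ≤ x ∧ x ≤ n)
def gOK (L : Nat) (x : Int) : Bool := decide (-(L : Int) ≤ x ∧ x < (L : Int))
def reachStep (gr : List (List Int)) (n : Int) (s : PySem.Set Int) : PySem.Set Int :=
  s.foldl (fun acc cur =>
    if gOK gr.length cur then
      PySem.Set.update acc (((PySem.List.pyGet? gr cur).getD []).filter (vOK n))
    else acc) s
def reachSet (gr : List (List Int)) (n : Int) : Nat → PySem.Set Int → PySem.Set Int
  | 0, s => s
  | k + 1, s => reachSet gr n k (reachStep gr n s)
def Pre_bfs (gr : List (List Int)) (n : Int) : Prop :=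
  1 ≤ n ∧ 2 ≤ gr.length ∧
    ∀ cur ∈ reachSet gr n (gr.flatten.length + 1) (PySem.Set.ofList [1]),
      gOK gr.length cur = true ∧ ∀ nxt ∈ (PySem.List.pyGet? gr cur).getD [], vOK n nxt = true
instance (gr : List (List Int)) (n : Int) : Decidable (Pre_bfs gr n) := by unfold Pre_bfs; infer_instance
def pvWitness_bfs : List (List Int) × Int := ([[], [2], [1]], 2)
def Spec_bfs (gr : List (List Int)) (n : Int) (out : List Int × (List (Int × Option (List Int)))) : Prop := out = bfs_alt gr n
instance (gr : List (List Int)) (n : Int) (out : List Int × (List (Int × Option (List Int)))) : Decidable (Spec_bfs gr n out) := by unfold Spec_bfs; infer_instance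

-- ===== CLAIM (what is proved, stated in full; the proofs are below) =====
def Claim_equal_bfs : Prop := ∀ (gr : List (List Int)) (n : Int), Dom_bfs gr n → Pre_bfs gr n → Spec_bfs gr n (bfs gr n)

-- ===== LEMMAS AND PROOFS =====

-- v evolves monotonically: a slot already ≠ -1 (or out of range) never changes again
def Mono (v w : List Int) : Prop :=
  ∀ j : Int, PySem.List.pyGet? v j ≠ some (-1) → PySem.List.pyGet? w j = PySem.List.pyGet? v j

theorem Mono.refl (v : List Int) : Mono v v := fun _ _ => rfl

theorem Mono.trans {u v w : List Int} (h1 : Mono u v) (h2 : Mono v w) : Mono u w := by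
  intro j hj
  rw [h2 j (by rw [h1 j hj]; exact hj), h1 j hj]

theorem mono_pySetD (v : List Int) (i x : Int) (hi : PySem.List.pyGet? v i = some (-1)) :
    Mono v (PySem.List.pySetD v i x) := by
  intro j hj
  simp only [PySem.List.pyGet?, PySem.List.pySetD, PySem.List.pySet?] at *
  cases hk : PySem.List.pyIdx? v.length i with
  | none => simp
  | some k =>
    simp only [Option.map_some, Option.getD_some, List.length_set]
    cases hm : PySem.List.pyIdx? v.length j with
    | none => simp [hm] at hj ⊢
    | some m =>
      simp only [hm, Option.bind_some] at hj ⊢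
      rcases eq_or_ne k m with rfl | hne
      · rw [hk, Option.bind_some] at hi; simp [hi] at hj
      · simp [List.getElem?_set_ne hne]

theorem get_pySetD_self (v : List Int) (i x : Int) (hi : PySem.List.pyGet? v i = some (-1)) :
    PySem.List.pyGet? (PySem.List.pySetD v i x) i = some x := by
  simp only [PySem.List.pyGet?, PySem.List.pySetD, PySem.List.pySet?] at *
  cases hk : PySem.List.pyIdx? v.length i with
  | none => simp [hk] at hi
  | some k =>
    simp only [hk, Option.bind_some] at hi
    simp only [hk, Option.map_some, Option.getD_some, List.length_set, Option.bind_some]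
    have hklt : k < v.length := by
      by_contra h
      rw [List.getElem?_eq_none (by omega)] at hi; simp at hi
    simp [hklt]

-- the one-row simulation: B's phase-1 row fold tracks A's row fold, the queue invariant is
-- preserved, and A's parent updates equal the phase-2 replay of the row against any later table w
theorem row_sim (cur d : Int) (hd : 0 ≤ d) (row : List Int) :
    ∀ (v : List Int) (qt : List (Int × Int)) (p : PySem.Dict Int (Option (List Int))),
    (row.foldl (stepB cur d) (v, qt.map Prod.fst)).1 = (row.foldl (stepA cur d) (v, qt, p)).1 ∧
    (row.foldl (stepB cur d) (v, qt.map Prod.fst)).2 = (row.foldl (stepA cur d) (v, qt, p)).2.1.map Prod.fst ∧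
    Mono v (row.foldl (stepA cur d) (v, qt, p)).1 ∧
    ((∀ cd ∈ qt, 0 ≤ cd.2 ∧ PySem.List.pyGet? v cd.1 = some cd.2) →
      ∀ cd ∈ (row.foldl (stepA cur d) (v, qt, p)).2.1,
        0 ≤ cd.2 ∧ PySem.List.pyGet? (row.foldl (stepA cur d) (v, qt, p)).1 cd.1 = some cd.2) ∧
    (∀ w, Mono (row.foldl (stepA cur d) (v, qt, p)).1 w →
      row.foldl (fun p nxt => if PySem.List.pyGet? w nxt = some (d + 1) then padd p nxt cur else p) p
        = (row.foldl (stepA cur d) (v, qt, p)).2.2) := by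
  induction row with
  | nil =>
    intro v qt p
    exact ⟨rfl, rfl, Mono.refl v, fun h => h, fun _ _ => rfl⟩
  | cons nxt rest ih =>
    intro v qt p
    by_cases h1 : PySem.List.pyGet? v nxt = some (-1)
    · -- unvisited: set v[nxt] := d+1, enqueue, append parent
      have hstepA : stepA cur d (v, qt, p) nxt =
          (PySem.List.pySetD v nxt (d + 1), qt ++ [(nxt, d + 1)], padd p nxt cur) := by
        simp [stepA, h1]
      have hstepB : stepB cur d (v, qt.map Prod.fst) nxt =
          (PySem.List.pySetD v nxt (d + 1), qt.map Prod.fst ++ [nxt]) := by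
        simp [stepB, h1]
      have hmap : qt.map Prod.fst ++ [nxt] = (qt ++ [(nxt, d + 1)]).map Prod.fst := by
        simp
      obtain ⟨ih1, ih2, ih3, ih4, ih5⟩ :=
        ih (PySem.List.pySetD v nxt (d + 1)) (qt ++ [(nxt, d + 1)]) (padd p nxt cur)
      have hmono1 : Mono v (PySem.List.pySetD v nxt (d + 1)) := mono_pySetD v nxt (d + 1) h1
      have hget1 : PySem.List.pyGet? (PySem.List.pySetD v nxt (d + 1)) nxt = some (d + 1) :=
        get_pySetD_self v nxt (d + 1) h1
      have e1 : (nxt :: rest).foldl (stepA cur d) (v, qt, p) =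
          rest.foldl (stepA cur d) (PySem.List.pySetD v nxt (d + 1), qt ++ [(nxt, d + 1)], padd p nxt cur) := by
        rw [List.foldl_cons, hstepA]
      have e2 : (nxt :: rest).foldl (stepB cur d) (v, qt.map Prod.fst) =
          rest.foldl (stepB cur d) (PySem.List.pySetD v nxt (d + 1), (qt ++ [(nxt, d + 1)]).map Prod.fst) := by
        rw [List.foldl_cons, hstepB, hmap]
      refine ⟨?_, ?_, ?_, ?_, ?_⟩
      · rw [e1, e2]; exact ih1
      · rw [e1, e2]; exact ih2
      · rw [e1]; exact hmono1.trans ih3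
      · intro hq cd hcd
        rw [e1] at hcd ⊢
        refine ih4 ?_ cd hcd
        intro cd' hcd'
        rcases List.mem_append.mp hcd' with hin | hnew
        · obtain ⟨h0, hv⟩ := hq cd' hin
          refine ⟨h0, ?_⟩
          rw [hmono1 cd'.1 (by rw [hv]; intro hc; injection hc with hc; omega)]
          exact hv
        · simp at hnew; subst hnew
          exact ⟨by omega, hget1⟩
      · intro w hw
        rw [e1] at hw ⊢
        rw [List.foldl_cons]
        have hwv : PySem.List.pyGet? w nxt = some (d + 1) := by
          have h2 : PySem.List.pyGet? (rest.foldl (stepA cur d)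
              (PySem.List.pySetD v nxt (d + 1), qt ++ [(nxt, d + 1)], padd p nxt cur)).1 nxt
              = some (d + 1) := by
            rw [ih3 nxt (by rw [hget1]; intro hc; injection hc with hc; omega)]
            exact hget1
          rw [hw nxt (by rw [h2]; intro hc; injection hc with hc; omega)]
          exact h2
        rw [if_pos hwv]
        exact ih5 w hw
    · by_cases h2 : PySem.List.pyGet? v nxt = some (d + 1)
      · -- already at distance d+1: append parent only
        have hstepA : stepA cur d (v, qt, p) nxt = (v, qt, padd p nxt cur) := by
          simp [stepA, h2]
          omega
        have hstepB : stepB cur d (v, qt.map Prod.fst) nxt = (v, qt.map Prod.fst) := by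
          simp [stepB, h1]
        obtain ⟨ih1, ih2, ih3, ih4, ih5⟩ := ih v qt (padd p nxt cur)
        have e1 : (nxt :: rest).foldl (stepA cur d) (v, qt, p) =
            rest.foldl (stepA cur d) (v, qt, padd p nxt cur) := by
          rw [List.foldl_cons, hstepA]
        have e2 : (nxt :: rest).foldl (stepB cur d) (v, qt.map Prod.fst) =
            rest.foldl (stepB cur d) (v, qt.map Prod.fst) := by
          rw [List.foldl_cons, hstepB]
        refine ⟨?_, ?_, ?_, ?_, ?_⟩
        · rw [e1, e2]; exact ih1
        · rw [e1, e2]; exact ih2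
        · rw [e1]; exact ih3
        · intro hq
          rw [e1]
          exact ih4 hq
        · intro w hw
          rw [e1] at hw ⊢
          rw [List.foldl_cons]
          have hne : (some (d + 1) : Option Int) ≠ some (-1) := by
            intro hc; injection hc with hc; omega
          have hwv : PySem.List.pyGet? w nxt = some (d + 1) := by
            rw [hw nxt (by rw [ih3 nxt (by rw [h2]; exact hne), h2]; exact hne),
              ih3 nxt (by rw [h2]; exact hne)]
            exact h2
          rw [if_pos hwv]
          exact ih5 w hw
      · -- untouched element
        have hstepA : stepA cur d (v, qt, p) nxt = (v, qt, p) := by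
          simp [stepA, h1, h2]
        have hstepB : stepB cur d (v, qt.map Prod.fst) nxt = (v, qt.map Prod.fst) := by
          simp [stepB, h1]
        obtain ⟨ih1, ih2, ih3, ih4, ih5⟩ := ih v qt p
        have e1 : (nxt :: rest).foldl (stepA cur d) (v, qt, p) =
            rest.foldl (stepA cur d) (v, qt, p) := by
          rw [List.foldl_cons, hstepA]
        have e2 : (nxt :: rest).foldl (stepB cur d) (v, qt.map Prod.fst) =
            rest.foldl (stepB cur d) (v, qt.map Prod.fst) := by
          rw [List.foldl_cons, hstepB]
        refine ⟨?_, ?_, ?_, ?_, ?_⟩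
        · rw [e1, e2]; exact ih1
        · rw [e1, e2]; exact ih2
        · rw [e1]; exact ih3
        · intro hq
          rw [e1]
          exact ih4 hq
        · intro w hw
          rw [e1] at hw ⊢
          rw [List.foldl_cons]
          have hwv : PySem.List.pyGet? w nxt ≠ some (d + 1) := by
            rw [hw nxt (by rw [ih3 nxt h1]; exact h1), ih3 nxt h1]
            exact h2
          rw [if_neg hwv]
          exact ih5 w hw

-- phase-1 BFS only extends v monotonically
theorem loopB_mono (gr : List (List Int)) :
    ∀ (fuel : Nat) (v : List Int) (q : List Int), Mono v (bfsLoopB gr fuel v q).1 := by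
  intro fuel
  induction fuel with
  | zero => intro v q; exact Mono.refl v
  | succ fuel ih =>
    intro v q
    cases q with
    | nil => exact Mono.refl v
    | cons cur qt =>
      show Mono v (bfsLoopB gr (fuel + 1) v (cur :: qt)).1
      simp only [bfsLoopB]
      set dc := PySem.List.pyGetD v cur 0 with hdc
      -- the row fold of stepB is monotone element by element
      have hrow : ∀ (row : List Int) (v' : List Int) (qt' : List Int),
          Mono v' (row.foldl (stepB cur dc) (v', qt')).1 := by
        intro row
        induction row with
        | nil => intro v' qt'; exact Mono.refl v'
        | cons nxt rest ihr =>
          intro v' qt'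
          by_cases h1 : PySem.List.pyGet? v' nxt = some (-1)
          · have : stepB cur dc (v', qt') nxt = (PySem.List.pySetD v' nxt (dc + 1), qt' ++ [nxt]) := by
              simp [stepB, h1]
            simp only [List.foldl_cons, this]
            exact (mono_pySetD v' nxt (dc + 1) h1).trans (ihr _ _)
          · have : stepB cur dc (v', qt') nxt = (v', qt') := by simp [stepB, h1]
            simp only [List.foldl_cons, this]
            exact ihr _ _
      exact (hrow _ v qt).trans (ih _ _)

-- the whole-loop simulation: A's fused loop equals B's phase 1 followed by the phase-2 replay
theorem loop_sim (gr : List (List Int)) :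
    ∀ (fuel : Nat) (v : List Int) (q : List (Int × Int)) (p : PySem.Dict Int (Option (List Int))),
    (∀ cd ∈ q, 0 ≤ cd.2 ∧ PySem.List.pyGet? v cd.1 = some cd.2) →
    bfsLoopA gr fuel v q p =
      ((bfsLoopB gr fuel v (q.map Prod.fst)).1,
       (bfsLoopB gr fuel v (q.map Prod.fst)).2.foldl
         (replayRow gr (bfsLoopB gr fuel v (q.map Prod.fst)).1) p) := by
  intro fuel
  induction fuel with
  | zero => intro v q p _; simp [bfsLoopA, bfsLoopB]
  | succ fuel ih =>
    intro v q p hQ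
    cases q with
    | nil => simp [bfsLoopA, bfsLoopB]
    | cons cd qt =>
      obtain ⟨cur, d⟩ := cd
      obtain ⟨hd, hvcur⟩ := hQ (cur, d) (List.mem_cons_self)
      have hdc : PySem.List.pyGetD v cur 0 = d := by
        simp [PySem.List.pyGetD, hvcur]
      obtain ⟨r1, r2, r3, r4, r5⟩ :=
        row_sim cur d hd ((PySem.List.pyGet? gr cur).getD []) v qt p
      have hQ' := r4 (fun cd' h => hQ cd' (List.mem_cons_of_mem _ h))
      simp only [bfsLoopA, bfsLoopB, List.map_cons, hdc]
      rw [ih _ _ _ hQ']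
      -- align B's recursive call with A's row-fold state
      rw [r1, r2] at *
      set a := ((PySem.List.pyGet? gr cur).getD []).foldl (stepA cur d) (v, qt, p) with ha
      set rb := bfsLoopB gr fuel a.1 (a.2.1.map Prod.fst) with hrb
      have hmono : Mono a.1 rb.1 := loopB_mono gr fuel a.1 (a.2.1.map Prod.fst)
      have hvcur' : PySem.List.pyGet? rb.1 cur = some d := by
        rw [hmono cur (by rw [r3 cur (by rw [hvcur]; intro hc; injection hc with hc; omega), hvcur]; intro hc; injection hc with hc; omega)]
        rw [r3 cur (by rw [hvcur]; intro hc; injection hc with hc; omega)]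
        exact hvcur
      have hreplay : replayRow gr rb.1 p cur = a.2.2 := by
        unfold replayRow
        rw [show PySem.List.pyGetD rb.1 cur 0 = d by simp [PySem.List.pyGetD, hvcur']]
        exact r5 rb.1 hmono
      simp only [List.foldl_cons, hreplay]

-- ===== VERDICT (by name: the statement is the Claim_ definition above) =====
theorem bfs_spec : Claim_equal_bfs := by
  intro gr n _ hpre
  obtain ⟨hn, _, _⟩ := hpre
  unfold Spec_bfs bfs bfs_alt
  dsimp only
  have hlen : (List.replicate (n + 1).toNat (-1 : Int)).length = (n + 1).toNat := by simp
  have hget : PySem.List.pyGet? (List.replicate (n + 1).toNat (-1 : Int)) 1 = some (-1) := by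
    have h2 : (1 : Nat) < (n + 1).toNat := by omega
    have := PySem.List.pyGet?_ofNat (n := 1) (xs := List.replicate (n + 1).toNat (-1 : Int))
      (by simpa [hlen] using h2)
    simpa using this
  have hinv : ∀ cd ∈ [((1 : Int), (0 : Int))], 0 ≤ cd.2 ∧
      PySem.List.pyGet? (PySem.List.pySetD (List.replicate (n + 1).toNat (-1 : Int)) 1 0) cd.1 = some cd.2 := by
    intro cd hcd
    simp only [List.mem_singleton] at hcd; subst hcd
    exact ⟨le_refl 0, get_pySetD_self _ 1 0 hget⟩
  have := loop_sim gr (n + 2).toNat (PySem.List.pySetD (List.replicate (n + 1).toNat (-1 : Int)) 1 0)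
    [(1, 0)] (PySem.Dict.empty.insert 1 none) hinv
  simp only [List.map_cons, List.map_nil] at this
  rw [this]
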